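-- pv_equiv track=rewrite | github.com/alphal00p/alphaloop | alpha_loop/FORM_processing.py | balanced_parenthesis
-- ===== SOURCE A (Python) =====
-- def balanced_parenthesis(s):
--     """ Returns None if balanced, and otherwise index of first offending parenthesis """
--     #pairs = {"{": "}", "(": ")", "[": "]"}
--     pairs = {"(": ")"}
--     stack = []
--     for i_c, c in enumerate(s):
--         #if c in "{[(":
--         if c=="(":
--             stack.append((i_c,c))
--         elif stack and c == pairs[stack[-1][1]]:
--             stack.pop()
--         elif c==")":
--             return i_c
--
--     return (stack[0][0] if len(stack)>0 else None)
-- ===== SOURCE B (Python) =====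
-- def balanced_parenthesis(s):
--     """ Returns None if balanced, and otherwise index of first offending parenthesis """
--     # Stage 1: running balance; the first index where it dips below zero is an
--     # unmatched ')' and is the first offender.
--     bal = 0
--     for i, c in enumerate(s):
--         if c == "(":
--             bal += 1
--         elif c == ")":
--             bal -= 1
--         if bal < 0:
--             return i
--     if bal == 0:
--         return None
--     # Stage 2: some '(' is unmatched.  Match right-to-left: each '(' cancels a
--     # pending ')' seen to its right; the last surviving '(' (the leftmost one)
--     # is the first offender.
--     surplus = 0
--     ans = None
--     for i in reversed(range(len(s))):
--         c = s[i]
--         if c == ")":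
--             surplus += 1
--         elif c == "(":
--             if surplus > 0:
--                 surplus -= 1
--             else:
--                 ans = i
--     return ans
-- ===== Notes on version B (the rewrite author's own statement) =====
-- stated objective: alternative
-- what changed: Replaces the single-pass explicit index stack with a staged two-pass scheme: a forward running-balance scan returns the first index where the balance dips negative (the first unmatched closing parenthesis), and otherwise a second right-to-left scan matches each opening parenthesis against pending closers to its right and returns the last surviving opener (the earliest unmatched one); no stack is built.
import Mathlib
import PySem

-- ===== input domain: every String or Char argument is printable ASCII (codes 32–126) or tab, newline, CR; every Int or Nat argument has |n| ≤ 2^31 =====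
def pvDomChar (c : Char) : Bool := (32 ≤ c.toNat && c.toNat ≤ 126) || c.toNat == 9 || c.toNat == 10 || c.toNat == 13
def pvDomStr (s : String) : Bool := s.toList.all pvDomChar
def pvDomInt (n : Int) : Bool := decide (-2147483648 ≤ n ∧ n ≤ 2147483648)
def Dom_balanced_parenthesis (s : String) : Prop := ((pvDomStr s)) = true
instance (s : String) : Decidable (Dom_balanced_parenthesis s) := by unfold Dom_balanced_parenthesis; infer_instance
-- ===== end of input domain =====

-- B replaces A's one-pass index stack by two staged stack-free scans (forward balance, then
-- right-to-left matching); same asymptotic cost, O(1) space.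

-- ===== PORT A =====
-- pairs = {"(": ")"}
def pvPairs : PySem.Dict Char Char := PySem.Dict.ofList [('(', ')')]

-- the loop over enumerate(s); stack in Python order (head = bottom, getLast? = stack[-1]).
-- Python's pairs[stack[-1][1]] would raise KeyError on a missing key; every pushed char is '(',
-- a key of pairs, so that is unreachable; the 'none' lookup case simply fails the equality test.
def pvGoA (stack : List (Int × Char)) (i : Int) (cs : List Char) : Option Int :=
  match cs with
  | [] => match stack.head? with
          | some (j, _) => some j          -- stack[0][0] if len(stack)>0
          | none => none
  | c :: rest =>
    if c = '(' then pvGoA (stack ++ [(i, c)]) (i + 1) rest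
    else
      match stack.getLast? with
      | some (_, ch) =>
        if pvPairs.get? ch = some c then pvGoA stack.dropLast (i + 1) rest
        else if c = ')' then some i
        else pvGoA stack (i + 1) rest
      | none =>
        if c = ')' then some i
        else pvGoA stack (i + 1) rest

def balanced_parenthesis (s : String) : Option Int := pvGoA [] 0 s.toList

-- ===== PORT B =====
-- Stage 1: forward running balance; Sum.inl i = early 'return i', Sum.inr bal = loop fell through.
def pvPass1 (bal : Int) (i : Int) (cs : List Char) : Int ⊕ Int :=
  match cs with
  | [] => Sum.inr bal
  | c :: rest =>
    let bal' := if c = '(' then bal + 1 else if c = ')' then bal - 1 else bal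
    if bal' < 0 then Sum.inl i else pvPass1 bal' (i + 1) rest

-- Stage 2: the loop 'for i in reversed(range(len(s)))'; cs is the reversed character list,
-- i the index of its head in the original string.
def pvPass2 (surplus : Int) (ans : Option Int) (i : Int) (cs : List Char) : Option Int :=
  match cs with
  | [] => ans
  | c :: rest =>
    if c = ')' then pvPass2 (surplus + 1) ans (i - 1) rest
    else if c = '(' then
      if surplus > 0 then pvPass2 (surplus - 1) ans (i - 1) rest
      else pvPass2 surplus (some i) (i - 1) rest
    else pvPass2 surplus ans (i - 1) rest

def balanced_parenthesis_alt (s : String) : Option Int :=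
  let cs := s.toList
  match pvPass1 0 0 cs with
  | Sum.inl i => some i
  | Sum.inr bal =>
    if bal = 0 then none
    else pvPass2 0 none ((cs.length : Int) - 1) cs.reverse

-- ===== PRECONDITION & SPEC =====
def Spec_balanced_parenthesis (s : String) (out : Option Int) : Prop := out = balanced_parenthesis_alt s
instance (s : String) (out : Option Int) : Decidable (Spec_balanced_parenthesis s out) := by unfold Spec_balanced_parenthesis; infer_instance

-- ===== CLAIM (what is proved, stated in full; the proofs are below) =====
def Claim_equal_balanced_parenthesis : Prop := ∀ (s : String), Dom_balanced_parenthesis s → Spec_balanced_parenthesis s (balanced_parenthesis s)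

-- ===== LEMMAS AND PROOFS =====

-- Common reference: pvRed cs i = (cl, op), the indices of the unmatched ')' and of the
-- unmatched '(' of cs standalone (i = index of the head), both in increasing order.
def pvRed (cs : List Char) (i : Int) : List Int × List Int :=
  match cs with
  | [] => ([], [])
  | c :: r =>
    let p := pvRed r (i + 1)
    if c = '(' then
      match p.1 with
      | [] => ([], i :: p.2)
      | _ :: t => (t, p.2)
    else if c = ')' then (i :: p.1, p.2)
    else p

lemma pvRed_snoc_open (cs : List Char) (i : Int) :
    pvRed (cs ++ ['(']) i = ((pvRed cs i).1, (pvRed cs i).2 ++ [i + cs.length]) := by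
  induction cs generalizing i with
  | nil => simp [pvRed]
  | cons c r ih =>
    rcases hp : pvRed r (i + 1) with ⟨cl, op⟩
    have ih' := ih (i + 1)
    rw [hp] at ih'
    have hj : i + 1 + (r.length : Int) = i + ((r.length + 1 : Nat) : Int) := by push_cast; ring
    simp only [List.cons_append, pvRed, ih', hj, List.length_cons, hp]
    cases cl <;> split_ifs <;> simp

lemma pvRed_snoc_close (cs : List Char) (i : Int) :
    pvRed (cs ++ [')']) i =
      (if (pvRed cs i).2 = [] then ((pvRed cs i).1 ++ [i + cs.length], [])
       else ((pvRed cs i).1, (pvRed cs i).2.dropLast)) := by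
  induction cs generalizing i with
  | nil => simp [pvRed]
  | cons c r ih =>
    rcases hp : pvRed r (i + 1) with ⟨cl, op⟩
    have ih' := ih (i + 1)
    rw [hp] at ih'
    have hj : i + 1 + (r.length : Int) = i + ((r.length + 1 : Nat) : Int) := by push_cast; ring
    simp only [List.cons_append, pvRed, ih', hj, List.length_cons, hp]
    cases op <;> cases cl <;> split_ifs <;> simp_all

lemma pvRed_snoc_other (cs : List Char) (i : Int) (c : Char) (h1 : c ≠ '(') (h2 : c ≠ ')') :
    pvRed (cs ++ [c]) i = pvRed cs i := by
  induction cs generalizing i with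
  | nil => simp [pvRed, h1, h2]
  | cons d r ih => simp only [List.cons_append, pvRed, ih (i + 1)]

-- answer shape shared by the A-side and stage-1 lemmas: n pending opens below the part
-- described by (cl, op), bot = answer should everything in (cl, op) cancel against them
def pvAns (cl op : List Int) (n : Nat) (bot : Option Int) : Option Int :=
  match cl[n]? with
  | some j => some j
  | none => if n = cl.length then op.head? else bot

-- A's stack run as a function of pvRed.
lemma pvGoA_spec (cs : List Char) : ∀ (i : Int) (S : List (Int × Char)),
    (∀ p ∈ S, p.2 = '(') →
    pvGoA S i cs = pvAns (pvRed cs i).1 (pvRed cs i).2 S.length (S.head?.map Prod.fst) := by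
  induction cs with
  | nil =>
    intro i S hS
    cases S <;> simp [pvGoA, pvRed, pvAns]
  | cons c r ih =>
    intro i S hS
    rcases hp : pvRed r (i + 1) with ⟨cl, op⟩
    by_cases hc : c = '('
    · subst hc
      have hS' : ∀ p ∈ S ++ [(i, '(')], p.2 = '(' := by
        intro p hp'
        rcases List.mem_append.1 hp' with h | h
        · exact hS p h
        · simp at h; simp [h]
      have hrec := ih (i + 1) (S ++ [(i, '(')]) hS'
      rw [hp] at hrec
      simp only [pvGoA, ite_true, pvRed, hp] at hrec ⊢
      rw [hrec]
      cases cl with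
      | nil =>
        cases S with
        | nil => simp [pvAns]
        | cons q t => simp [pvAns]
      | cons x t =>
        cases S with
        | nil =>
          simp only [List.nil_append, List.length_nil, List.length_cons]
          cases hg : t[(0 : Nat)]? with
          | some j => simp [pvAns, hg]
          | none =>
            have ht : t = [] := by
              cases t with
              | nil => rfl
              | cons y ys => simp at hg
            simp [pvAns, ht]
        | cons q u =>
          simp only [List.cons_append, List.length_cons, List.length_append,
            List.length_cons, List.length_nil]
          cases hg : t[(q :: u).length]? with
          | some j => simp [pvAns]
          | none => simp [pvAns]
    · by_cases hd : c = ')'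
      · subst hd
        cases S with
        | nil =>
          simp [pvGoA, pvRed, hp, hc, pvAns]
        | cons q u =>
          obtain ⟨j, ch, hlast⟩ : ∃ j ch, (q :: u).getLast? = some (j, ch) := by
            rcases h : (q :: u).getLast? with _ | ⟨⟨j, ch⟩⟩
            · simp at h
            · exact ⟨j, ch, rfl⟩
          have hch : ch = '(' := by
            have := hS (j, ch) (List.mem_of_getLast? hlast)
            simpa using this
          subst hch
          have hget : pvPairs.get? '(' = some ')' := by decide
          have hS' : ∀ p ∈ (q :: u).dropLast, p.2 = '(' :=
            fun p hp' => hS p (List.mem_of_mem_dropLast hp')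
          have hrec := ih (i + 1) (q :: u).dropLast hS'
          rw [hp] at hrec
          simp only [pvGoA, hlast, hget, if_neg hc, pvRed, hp, ite_true]
          rw [hrec]
          have hlen : (q :: u).dropLast.length = u.length := by simp
          cases u with
          | nil =>
            cases hg : cl[(0 : Nat)]? with
            | some w => simp [pvAns, hg]
            | none =>
              have hcl : cl = [] := by
                cases cl with
                | nil => rfl
                | cons _ _ => simp at hg
              subst hcl; simp [pvAns]
          | cons b v =>
            rw [hlen]
            cases hg : cl[(b :: v).length]? with
            | some w => simp [pvAns]
            | none =>
              by_cases he : (b :: v).length = cl.length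
              · simp [pvAns, he]
              · simp [pvAns]
      · -- ordinary character
        have hrecS : ∀ {S' : List (Int × Char)}, S' = S →
            pvGoA S i (c :: r) = pvGoA S (i + 1) r := by
          intro _ _
          cases S with
          | nil => simp [pvGoA, if_neg hc, if_neg hd]
          | cons q u =>
            obtain ⟨j, ch, hlast⟩ : ∃ j ch, (q :: u).getLast? = some (j, ch) := by
              rcases h : (q :: u).getLast? with _ | ⟨⟨j, ch⟩⟩
              · simp at h
              · exact ⟨j, ch, rfl⟩
            have hch : ch = '(' := by
              have := hS (j, ch) (List.mem_of_getLast? hlast)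
              simpa using this
            subst hch
            have hne : ¬ (pvPairs.get? '(' = some c) := by
              have : pvPairs.get? '(' = some ')' := by decide
              rw [this]; simpa using fun h => hd h.symm
            simp [pvGoA, hlast, if_neg hc, if_neg hne, if_neg hd]
        rw [hrecS rfl]
        have hrec := ih (i + 1) S hS
        rw [hp] at hrec
        simp only [pvRed, hp, if_neg hc, if_neg hd]
        exact hrec

-- B's stage 1 as a function of pvRed.
lemma pvPass1_spec (cs : List Char) : ∀ (i : Int) (d : Nat),
    pvPass1 (d : Int) i cs =
      (match (pvRed cs i).1[d]? with
       | some j => Sum.inl j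
       | none => Sum.inr ((d : Int) + (pvRed cs i).2.length - (pvRed cs i).1.length)) := by
  induction cs with
  | nil => intro i d; simp [pvPass1, pvRed]
  | cons c r ih =>
    intro i d
    rcases hp : pvRed r (i + 1) with ⟨cl, op⟩
    by_cases hc : c = '('
    · subst hc
      have h1 : ¬ ((d : Int) + 1 < 0) := by omega
      have hrec := ih (i + 1) (d + 1)
      rw [hp] at hrec
      push_cast at hrec
      simp only [pvPass1, ite_true, if_neg h1, pvRed, hp]
      rw [hrec]
      cases cl with
      | nil => simp; ring_nf
      | cons x t =>
        simp only [List.getElem?_cons_succ, List.length_cons]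
        cases hg : t[d]? with
        | some j => simp
        | none => simp; omega
    · by_cases hd : c = ')'
      · subst hd
        cases d with
        | zero =>
          simp [pvPass1, hc, pvRed, hp]
        | succ n =>
          have h1 : ¬ ((((n : Int) + 1) - 1) < 0) := by omega
          have hrec := ih (i + 1) n
          rw [hp] at hrec
          have hcast : ((n + 1 : Nat) : Int) - 1 = (n : Int) := by push_cast; ring
          simp only [pvPass1, if_neg hc, ite_true, pvRed, hp]
          push_cast
          rw [if_neg h1, show ((n : Int) + 1) - 1 = (n : Int) by ring, hrec]
          cases hg : cl[n]? with
          | some j => simp [hg]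
          | none => simp [hg]; omega
      · have h1 : ¬ ((d : Int) < 0) := by omega
        have hrec := ih (i + 1) d
        rw [hp] at hrec
        simp only [pvPass1, if_neg hc, if_neg hd, if_neg h1, pvRed, hp]
        exact hrec

-- B's stage 2 as a function of pvRed (t is the reversed segment, s0 the index of its first
-- character in the original string).
lemma pvPass2_spec (t : List Char) : ∀ (s0 : Int) (su : Nat) (ans : Option Int),
    pvPass2 (su : Int) ans (s0 + t.length - 1) t =
      (if su < (pvRed t.reverse s0).2.length then (pvRed t.reverse s0).2.head? else ans) := by
  induction t with
  | nil => intro s0 su ans; simp [pvPass2, pvRed]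
  | cons c r ih =>
    intro s0 su ans
    rcases hp : pvRed r.reverse s0 with ⟨cl, op⟩
    have hlen : (r.reverse.length : Int) = (r.length : Int) := by simp
    have hstep : s0 + ((c :: r).length : Int) - 1 - 1 = s0 + (r.length : Int) - 1 := by
      simp only [List.length_cons]; push_cast; ring
    have hi0 : s0 + (r.reverse.length : Int) = s0 + ((c :: r).length : Int) - 1 := by
      rw [hlen]; simp only [List.length_cons]; push_cast; ring
    have hrev : (c :: r).reverse = r.reverse ++ [c] := by simp
    by_cases hc : c = ')'
    · subst hc
      have hsnoc := pvRed_snoc_close r.reverse s0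
      rw [hp] at hsnoc
      have hrec := ih s0 (su + 1) ans
      rw [hp] at hrec
      push_cast at hrec
      simp only [pvPass2, ite_true, hstep]
      rw [hrec]
      simp only [hrev, hsnoc]
      by_cases hop : op = []
      · simp [hop]
      · rw [if_neg hop]
        cases op with
        | nil => exact absurd rfl hop
        | cons y ys =>
          simp only [List.length_cons, List.length_dropLast]
          by_cases hlt : su + 1 < ys.length + 1
          · rw [if_pos hlt, if_pos (by omega : su < ys.length + 1 - 1)]
            cases ys with
            | nil => simp at hlt
            | cons z zs => simp
          · rw [if_neg hlt, if_neg (by omega : ¬ su < ys.length + 1 - 1)]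
    · by_cases hco : c = '('
      · subst hco
        have hsnoc := pvRed_snoc_open r.reverse s0
        rw [hp] at hsnoc
        simp only [hrev, hsnoc, hi0]
        rcases su with _ | m
        · -- surplus == 0 : remember this index
          have hrec := ih s0 0 (some (s0 + ((('(') :: r).length : Int) - 1))
          rw [hp] at hrec
          simp only [pvPass2, if_neg (by decide : ¬ ('(' = ')')), ite_true,
            if_neg (by omega : ¬ ((0:Nat):Int) > 0), hstep]
          rw [hrec]
          simp only [List.length_append, List.length_cons, List.length_nil]
          rw [if_pos (by omega : (0:Nat) < op.length + 1)]
          by_cases hop : 0 < op.length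
          · rw [if_pos hop]
            cases op with
            | nil => simp at hop
            | cons y ys => simp
          · rw [if_neg hop]
            have : op = [] := by cases op with | nil => rfl | cons _ _ => simp at hop
            subst this; simp
        · -- surplus > 0 : this '(' cancels a close to its right
          have hrec := ih s0 m ans
          rw [hp] at hrec
          have hgt : ((m + 1 : Nat) : Int) > 0 := by push_cast; omega
          have hm1 : ((m + 1 : Nat) : Int) - 1 = ((m : Nat) : Int) := by push_cast; ring
          simp only [pvPass2, if_neg (by decide : ¬ ('(' = ')')), ite_true,
            if_pos hgt, hstep, hm1]
          rw [hrec]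
          simp only [List.length_append, List.length_cons, List.length_nil]
          by_cases hm : m < op.length
          · rw [if_pos hm, if_pos (by omega : m + 1 < op.length + 1)]
            cases op with
            | nil => simp at hm
            | cons y ys => simp
          · rw [if_neg hm, if_neg (by omega : ¬ (m + 1 < op.length + 1))]
      · have hsnoc := pvRed_snoc_other r.reverse s0 c hco hc
        rw [hp] at hsnoc
        have hrec := ih s0 su ans
        rw [hp] at hrec
        simp only [pvPass2, if_neg hc, if_neg hco, hstep]
        rw [hrec]
        simp only [hrev, hsnoc]

-- ===== VERDICT (by name: the statement is the Claim_ definition above) =====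
theorem balanced_parenthesis_spec : Claim_equal_balanced_parenthesis := by
  intro s _
  unfold Spec_balanced_parenthesis balanced_parenthesis balanced_parenthesis_alt
  rcases hp : pvRed s.toList 0 with ⟨cl, op⟩
  have hA := pvGoA_spec s.toList 0 [] (by simp)
  rw [hp] at hA
  simp only [List.length_nil, List.head?_nil, Option.map_none] at hA
  have hB1 := pvPass1_spec s.toList 0 0
  rw [hp] at hB1
  simp only [Nat.cast_zero] at hB1
  simp only [hA, hB1]
  cases hg : cl[(0 : Nat)]? with
  | some j => simp [pvAns, hg]
  | none =>
    have hcl : cl = [] := by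
      cases cl with
      | nil => rfl
      | cons _ _ => simp at hg
    subst hcl
    simp only [pvAns, hg, List.length_nil]
    by_cases hop : op = []
    · subst hop; simp
    · have hlen0 : 0 < op.length := List.length_pos_of_ne_nil hop
      simp only [if_true]
      rw [if_neg (by push_cast; omega)]
      have hB2 := pvPass2_spec s.toList.reverse 0 0 none
      rw [List.reverse_reverse, hp] at hB2
      have hidx : (0 : Int) + (s.toList.reverse.length : Int) - 1 =
          (s.toList.length : Int) - 1 := by simp
      rw [hidx, Nat.cast_zero] at hB2
      rw [hB2, if_pos (by cases op with | nil => exact absurd rfl hop | cons _ _ => simp)]
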